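-- pv_equiv track=rewrite | github.com/tjrunt/python_fileManagement | Python_fileManagement/nike_FileManagement_classes.py | getRowCountForSearches
-- ===== SOURCE A (Python) =====
-- def getRowCountForSearches(col):
-- 	next_cell = 1
-- 	previous_cell = 0
-- 	count = 1
-- 	unique_row_count = []
-- 	for i in col:
-- 		temp = i
-- 		try:
-- 			if i == col[next_cell]:
-- 				count += 1
-- 				previous_cell += 1
-- 				next_cell += 1
-- 			else:
-- 				unique_row_count.append(count)
-- 				count = 1
-- 				previous_cell += 1
-- 				next_cell += 1
-- 		except:
-- 				pass
-- 	return unique_row_count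
-- ===== SOURCE B (Python) =====
-- def getRowCountForSearches(col):
--     boundaries = [0] + [i for i in range(1, len(col)) if col[i] != col[i - 1]]
--     return [b - a for a, b in zip(boundaries, boundaries[1:])]
-- ===== Notes on version B (the rewrite author's own statement) =====
-- stated objective: simpler
-- what changed: Replaces A's stateful single-pass run-length loop (index counters, try/except, accumulator) with a two-stage boundary computation: collect run-start indices, then return consecutive differences, which drops the final run exactly as A does.
import Mathlib
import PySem

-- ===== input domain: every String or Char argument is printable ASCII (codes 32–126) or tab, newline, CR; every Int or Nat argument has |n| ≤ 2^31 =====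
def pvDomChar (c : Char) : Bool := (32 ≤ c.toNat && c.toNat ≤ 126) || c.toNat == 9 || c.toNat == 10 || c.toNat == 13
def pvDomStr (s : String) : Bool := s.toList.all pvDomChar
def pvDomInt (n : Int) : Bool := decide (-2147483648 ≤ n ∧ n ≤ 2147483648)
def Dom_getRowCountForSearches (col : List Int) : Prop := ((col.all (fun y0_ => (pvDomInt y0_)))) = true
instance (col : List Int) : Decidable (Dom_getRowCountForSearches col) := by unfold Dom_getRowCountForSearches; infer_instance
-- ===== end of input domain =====

-- B replaces A's stateful single-pass run-length loop with a two-stage computation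
-- (collect run-start boundary indices, then take consecutive differences); objective: simpler.

-- ===== PORT A =====
-- state: (next_cell, previous_cell, count, unique_row_count); the try/except
-- around the whole body makes an out-of-range col[next_cell] leave the state unchanged.
def stepA (col : List Int) (st : Int × Int × Int × List Int) (i : Int) :
    Int × Int × Int × List Int :=
  match PySem.List.pyGet? col st.1 with
  | some v =>
      if i = v then (st.1 + 1, st.2.1 + 1, st.2.2.1 + 1, st.2.2.2)
      else (st.1 + 1, st.2.1 + 1, 1, st.2.2.2 ++ [st.2.2.1])
  | none => st

def getRowCountForSearches (col : List Int) : List Int :=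
  (col.foldl (stepA col) (1, 0, 1, [])).2.2.2

-- ===== PORT B =====
-- boundaries = [0] + [i for i in range(1, len(col)) if col[i] != col[i-1]]
-- return [b - a for a, b in zip(boundaries, boundaries[1:])]
def getRowCountForSearches_alt (col : List Int) : List Int :=
  let boundaries : List Int :=
    0 :: (PySem.List.pyRange 1 (col.length : Int) 1).filter
      (fun i => PySem.List.pyGet? col i != PySem.List.pyGet? col (i - 1))
  (boundaries.zip boundaries.tail).map (fun p => p.2 - p.1)

-- ===== PRECONDITION & SPEC =====
def Spec_getRowCountForSearches (col : List Int) (out : List Int) : Prop := out = getRowCountForSearches_alt col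
instance (col : List Int) (out : List Int) : Decidable (Spec_getRowCountForSearches col out) := by unfold Spec_getRowCountForSearches; infer_instance

-- ===== CLAIM (what is proved, stated in full; the proofs are below) =====
def Claim_equal_getRowCountForSearches : Prop := ∀ (col : List Int), Dom_getRowCountForSearches col → Spec_getRowCountForSearches col (getRowCountForSearches col)

-- ===== LEMMAS AND PROOFS =====

-- common specification: run lengths with the final run dropped, current-run counter c
def rdl (c : Int) : List Int → List Int
  | [] => []
  | [_] => []
  | x :: y :: t => if x = y then rdl (c + 1) (y :: t) else c :: rdl 1 (y :: t)

-- adjacent differences, as B's zip-map computes them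
def zd (l : List Int) : List Int := (l.zip l.tail).map (fun p => p.2 - p.1)

lemma zd_single (a : Int) : zd [a] = [] := rfl
lemma zd_cons_cons (a b : Int) (t : List Int) : zd (a :: b :: t) = (b - a) :: zd (b :: t) := rfl

lemma foldA (col : List Int) :
    ∀ (suf : List Int) (k : Nat) (p c : Int) (acc : List Int),
      col.drop k = suf →
      (List.foldl (stepA col) (((k : Int) + 1), p, c, acc) suf).2.2.2 = acc ++ rdl c suf := by
  intro suf
  induction suf with
  | nil => intro k p c acc _; simp [rdl]
  | cons x suf ih =>
    intro k p c acc hdrop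
    have hget : PySem.List.pyGet? col ((k : Int) + 1) = suf.head? := by
      have h1 : col[k + 1]? = (col.drop k)[1]? := by
        rw [List.getElem?_drop]
      have hc : ((k : Int) + 1) = ((k + 1 : Nat) : Int) := by push_cast; ring
      rw [hc, PySem.List.pyGet?_natCast, h1, hdrop]
      cases suf <;> simp
    have hdrop' : col.drop (k + 1) = suf := by
      rw [← List.tail_drop, hdrop]
      rfl
    cases suf with
    | nil =>
      simp only [List.foldl_cons, List.foldl_nil, stepA, hget]
      simp [rdl]
    | cons y t =>
      rw [List.foldl_cons]
      by_cases hxy : x = y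
      · have hstep : stepA col (((k : Int) + 1), p, c, acc) x
            = (((k + 1 : Nat) : Int) + 1, p + 1, c + 1, acc) := by
          simp [stepA, hget, hxy]
        rw [hstep, ih (k + 1) (p + 1) (c + 1) acc hdrop']
        simp [rdl, hxy]
      · have hstep : stepA col (((k : Int) + 1), p, c, acc) x
            = (((k + 1 : Nat) : Int) + 1, p + 1, 1, acc ++ [c]) := by
          simp [stepA, hget, hxy]
        rw [hstep, ih (k + 1) (p + 1) 1 (acc ++ [c]) hdrop']
        simp [rdl, hxy]

lemma A_eq_rdl (col : List Int) : getRowCountForSearches col = rdl 1 col := by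
  have := foldA col col 0 0 1 [] (by simp)
  simpa [getRowCountForSearches] using this

lemma foldB (col : List Int) :
    ∀ (suf : List Int) (j : Nat) (b : Int),
      col.drop j = suf → j < col.length →
      zd (b :: (PySem.List.pyRange ((j : Int) + 1) (col.length : Int) 1).filter
            (fun i => PySem.List.pyGet? col i != PySem.List.pyGet? col (i - 1)))
        = rdl ((j : Int) - b + 1) suf := by
  intro suf
  induction suf with
  | nil =>
    intro j b hdrop hj
    have hlen := congrArg List.length hdrop
    simp at hlen
    omega
  | cons x suf ih =>
    intro j b hdrop hj
    have hx : col[j]? = some x := by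
      have h : (col.drop j)[0]? = col[j + 0]? := List.getElem?_drop
      rw [hdrop] at h
      simpa using h.symm
    have hdrop' : col.drop (j + 1) = suf := by
      rw [← List.tail_drop, hdrop]
      rfl
    cases suf with
    | nil =>
      have hlen := congrArg List.length hdrop
      simp at hlen
      rw [PySem.List.pyRange_one_eq_nil (by omega)]
      simp [zd_single, rdl]
    | cons y t =>
      have hlen := congrArg List.length hdrop
      simp at hlen
      have hj1 : j + 1 < col.length := by omega
      have hy : col[j + 1]? = some y := by
        have h : (col.drop j)[1]? = col[j + 1]? := List.getElem?_drop
        rw [hdrop] at h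
        simpa using h.symm
      rw [PySem.List.pyRange_one_cons (by exact_mod_cast by omega)]
      have hcast : ((j : Int) + 1) = ((j + 1 : Nat) : Int) := by push_cast; ring
      have hgj1 : PySem.List.pyGet? col ((j : Int) + 1) = some y := by
        rw [hcast, PySem.List.pyGet?_natCast, hy]
      have hgj : PySem.List.pyGet? col ((j : Int) + 1 - 1) = some x := by
        have h : ((j : Int) + 1 - 1) = ((j : Nat) : Int) := by ring
        rw [h, PySem.List.pyGet?_natCast, hx]
      rw [List.filter_cons]
      by_cases hxy : x = y
      · rw [if_neg (by rw [hgj1, hgj]; simp [hxy])]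
        have h := ih (j + 1) b hdrop' hj1
        rw [hcast, h]
        have h2 : ((j + 1 : Nat) : Int) - b + 1 = ((j : Int) - b + 1) + 1 := by push_cast; ring
        rw [h2]
        simp only [rdl, if_pos hxy]
      · rw [if_pos (by rw [hgj1, hgj]; simpa using Ne.symm hxy)]
        rw [zd_cons_cons]
        have h := ih (j + 1) ((j : Int) + 1) hdrop' hj1
        rw [hcast] at h ⊢
        rw [h]
        have h1 : ((j + 1 : Nat) : Int) - ((j + 1 : Nat) : Int) + 1 = (1 : Int) := by ring
        have h2 : ((j + 1 : Nat) : Int) - b = (j : Int) - b + 1 := by push_cast; ring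
        rw [h1, h2]
        simp only [rdl, if_neg hxy]

lemma B_eq_rdl (col : List Int) : getRowCountForSearches_alt col = rdl 1 col := by
  unfold getRowCountForSearches_alt
  cases col with
  | nil => rfl
  | cons x t =>
    have h := foldB (x :: t) (x :: t) 0 0 (by simp) (by simp)
    simp only [Nat.cast_zero, zero_add, sub_zero] at h
    simpa [zd] using h

-- ===== VERDICT (by name: the statement is the Claim_ definition above) =====
theorem getRowCountForSearches_spec : Claim_equal_getRowCountForSearches := by
  intro col _
  unfold Spec_getRowCountForSearches
  rw [A_eq_rdl, B_eq_rdl]
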